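-- pv_equiv track=rewrite | github.com/mstockl9/ayed1-2025-tps | TP4/tp4ej7_eliminarsubcadena.py | eliminar_subcadena_v2
-- ===== SOURCE A (Python) =====
-- def eliminar_subcadena_v2(cadena: str, posicion: int, caracteres: int) -> str: # No usa slices
--     """
--     Elimina la subcadena de la cadena ingresada, que comience en la posición recibida y tenga la cantidad
--     de caracteres deseada.
--
--     Pre: Recibe como parámetros la cadena, la posición en la que comienza la subcadena y la cantidad de caracteres que tiene.
--     Post: Retorna una string correspondiente a la cadena ingresada sin la subcadena con las características recibidas.
--     """
--     subcadena = ""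
--
--     for c in range(len(cadena)):
--         if c >= posicion and c < posicion+caracteres:
--             continue
--         elif c >= len(cadena):
--             break
--
--         subcadena += cadena[c]
--
--     return subcadena
-- ===== SOURCE B (Python) =====
-- def eliminar_subcadena_v2(cadena: str, posicion: int, caracteres: int) -> str:
--     inicio = max(0, posicion)
--     fin = min(len(cadena), posicion + caracteres)
--     if inicio >= fin:
--         return cadena
--     return cadena[:inicio] + cadena[fin:]
-- ===== Notes on version B (the rewrite author's own statement) =====
-- stated objective: idiomatic
-- what changed: Replaces the per-character index loop that rebuilds the string with closed-form clamped bounds and two slices (no iteration over characters in Python).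
import Mathlib
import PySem

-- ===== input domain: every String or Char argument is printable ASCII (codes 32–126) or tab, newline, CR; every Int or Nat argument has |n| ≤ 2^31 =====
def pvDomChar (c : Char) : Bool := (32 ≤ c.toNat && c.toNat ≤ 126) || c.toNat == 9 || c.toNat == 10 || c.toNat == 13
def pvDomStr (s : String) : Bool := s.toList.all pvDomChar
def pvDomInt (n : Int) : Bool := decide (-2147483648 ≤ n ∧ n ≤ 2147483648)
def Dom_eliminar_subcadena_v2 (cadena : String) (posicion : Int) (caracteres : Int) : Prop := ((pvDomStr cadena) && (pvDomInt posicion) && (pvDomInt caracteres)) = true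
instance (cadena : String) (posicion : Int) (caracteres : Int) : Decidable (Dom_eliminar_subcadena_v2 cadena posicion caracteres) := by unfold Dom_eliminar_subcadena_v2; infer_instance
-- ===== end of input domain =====

-- B replaces A's char-by-char accumulating loop with closed-form clamped bounds and two slices (idiomatic).

-- ===== PORT A =====
-- the 'for c in range(len(cadena))' loop: skip (continue) on the removal window,
-- break on the (dead) 'c >= len(cadena)' branch, otherwise append cadena[c]
def pvGoA (cs : List Char) (posicion caracteres : Int) (n : Nat) (c : Nat) (acc : List Char) : List Char :=
  if c < n then
    if posicion ≤ (c : Int) ∧ (c : Int) < posicion + caracteres then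
      pvGoA cs posicion caracteres n (c+1) acc            -- continue
    else if (n : Int) ≤ (c : Int) then acc                -- break (never fires: c < n)
    else pvGoA cs posicion caracteres n (c+1) (acc ++ [cs.getD c ' '])  -- subcadena += cadena[c]
  else acc
termination_by n - c

def eliminar_subcadena_v2 (cadena : String) (posicion : Int) (caracteres : Int) : String :=
  String.ofList (pvGoA cadena.toList posicion caracteres cadena.toList.length 0 [])

-- ===== PORT B =====
def eliminar_subcadena_v2_alt (cadena : String) (posicion : Int) (caracteres : Int) : String :=
  let cs := cadena.toList
  let inicio := max 0 posicion
  let fin := min (cs.length : Int) (posicion + caracteres)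
  if inicio ≥ fin then cadena
  else String.ofList (PySem.List.slice cs none (some inicio) ++ PySem.List.slice cs (some fin) none)

-- ===== PRECONDITION & SPEC =====
def Spec_eliminar_subcadena_v2 (cadena : String) (posicion : Int) (caracteres : Int) (out : String) : Prop := out = eliminar_subcadena_v2_alt cadena posicion caracteres
instance (cadena : String) (posicion : Int) (caracteres : Int) (out : String) : Decidable (Spec_eliminar_subcadena_v2 cadena posicion caracteres out) := by unfold Spec_eliminar_subcadena_v2; infer_instance

-- ===== CLAIM (what is proved, stated in full; the proofs are below) =====
def Claim_equal_eliminar_subcadena_v2 : Prop := ∀ (cadena : String) (posicion : Int) (caracteres : Int), Dom_eliminar_subcadena_v2 cadena posicion caracteres → Spec_eliminar_subcadena_v2 cadena posicion caracteres (eliminar_subcadena_v2 cadena posicion caracteres)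

-- ===== LEMMAS AND PROOFS =====

-- A's loop keeps exactly the characters whose index is outside the removal window
lemma pvGoA_filter (cs : List Char) (pos car : Int) (n : Nat) :
    ∀ k c acc, c + k = n →
      pvGoA cs pos car n c acc =
        acc ++ ((List.range' c k).filter
          (fun j : Nat => !(decide (pos ≤ (j : Int)) && decide ((j : Int) < pos + car)))).map
          (fun j : Nat => cs.getD j ' ') := by
  intro k
  induction k with
  | zero =>
    intro c acc h
    rw [pvGoA, if_neg (by omega)]
    simp
  | succ k ih =>
    intro c acc h
    rw [pvGoA]
    have hc : c < n := by omega
    have hnb : ¬ ((n : Int) ≤ (c : Int)) := by exact_mod_cast Nat.not_le.mpr hc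
    simp only [if_pos hc, List.range'_succ, List.filter_cons]
    by_cases hcond : pos ≤ (c : Int) ∧ (c : Int) < pos + car
    · rw [if_pos hcond, ih (c+1) acc (by omega)]
      simp [hcond.1, hcond.2]
    · rw [if_neg hcond, if_neg hnb, ih (c+1) (acc ++ [cs.getD c ' ']) (by omega)]
      have hbool : (!(decide (pos ≤ (c : Int)) && decide ((c : Int) < pos + car))) = true := by
        simp only [Bool.not_eq_true', Bool.and_eq_false_iff, decide_eq_false_iff_not]
        tauto
      rw [hbool]
      simp

-- reading off a contiguous block of indices gives take-of-drop
lemma map_getD_range' (cs : List Char) (c k : Nat) (h : c + k ≤ cs.length) :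
    (List.range' c k).map (fun j : Nat => cs.getD j ' ') = (cs.drop c).take k := by
  induction k generalizing c with
  | zero => simp
  | succ k ih =>
    have hc : c < cs.length := by omega
    rw [List.range'_succ, List.map_cons, ih (c+1) (by omega),
        List.drop_eq_getElem_cons hc, List.take_succ_cons]
    simp [List.getD_eq_getElem?_getD, List.getElem?_eq_getElem hc]

-- ===== VERDICT (by name: the statement is the Claim_ definition above) =====
theorem eliminar_subcadena_v2_spec : Claim_equal_eliminar_subcadena_v2 := by
  intro cadena pos car _
  unfold Spec_eliminar_subcadena_v2 eliminar_subcadena_v2 eliminar_subcadena_v2_alt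
  set cs := cadena.toList with hcs
  set n := cs.length with hn
  rw [pvGoA_filter cs pos car n n 0 [] (by omega)]
  simp only [List.nil_append]
  by_cases hle : max 0 pos ≥ min (n : Int) (pos + car)
  · -- empty removal window: every index is kept, the filter is the identity
    rw [if_pos hle]
    have hall : ((List.range' 0 n).filter
        (fun j : Nat => !(decide (pos ≤ (j : Int)) && decide ((j : Int) < pos + car)))) =
        List.range' 0 n := by
      apply List.filter_eq_self.mpr
      intro j hj
      have hjn : j < n := by have := List.mem_range'_1.mp hj; omega
      have hjn' : (j : Int) < (n : Int) := by exact_mod_cast hjn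
      have hj0 : (0 : Int) ≤ (j : Int) := Int.natCast_nonneg j
      simp only [Bool.not_eq_true', Bool.and_eq_false_iff, decide_eq_false_iff_not]
      by_cases hp : pos ≤ (j : Int)
      · right; omega
      · left; exact hp
    rw [hall, map_getD_range' cs 0 n (by omega), List.drop_zero, hn, List.take_length]
    simp [hcs]
  · rw [if_neg hle]
    rw [ge_iff_le, not_le] at hle
    set i : Int := max 0 pos with hi
    set f : Int := min (n : Int) (pos + car) with hf
    have hi0 : 0 ≤ i := le_max_left _ _
    have hf0 : 0 ≤ f := le_trans hi0 (le_of_lt hle)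
    set a : Nat := i.toNat with ha
    set b : Nat := f.toNat with hb
    have hia : (a : Int) = i := Int.toNat_of_nonneg hi0
    have hfb : (b : Int) = f := Int.toNat_of_nonneg hf0
    have hab : a < b := by omega
    have hbn : b ≤ n := by
      have hfn : f ≤ (n : Int) := min_le_left _ _
      omega
    -- split range n into [0,a) ++ [a,b) ++ [b,n)
    have hsplit : List.range' 0 n = List.range' 0 a ++ List.range' a (b - a) ++ List.range' b (n - b) := by
      have e1 : List.range' 0 a ++ List.range' (0 + a) (b - a) = List.range' 0 (a + (b - a)) :=
        List.range'_append_1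
      have e2 : List.range' 0 (a + (b - a)) ++ List.range' (0 + (a + (b - a))) (n - b) =
          List.range' 0 (a + (b - a) + (n - b)) := List.range'_append_1
      rw [show (0 + a) = a by omega, show a + (b - a) = b by omega] at e1
      rw [show a + (b - a) = b by omega, show (0 + b) = b by omega,
          show b + (n - b) = n by omega] at e2
      rw [e1, e2]
    rw [hsplit, List.filter_append, List.filter_append]
    have hkeep1 : (List.range' 0 a).filter
        (fun j : Nat => !(decide (pos ≤ (j : Int)) && decide ((j : Int) < pos + car))) = List.range' 0 a := by
      apply List.filter_eq_self.mpr
      intro j hj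
      have hja : j < a := by have := List.mem_range'_1.mp hj; omega
      have hja' : (j : Int) < i := by omega
      have hj0 : (0 : Int) ≤ (j : Int) := Int.natCast_nonneg j
      simp only [Bool.not_eq_true', Bool.and_eq_false_iff, decide_eq_false_iff_not]
      left
      omega
    have hdrop : (List.range' a (b - a)).filter
        (fun j : Nat => !(decide (pos ≤ (j : Int)) && decide ((j : Int) < pos + car))) = [] := by
      apply List.filter_eq_nil_iff.mpr
      intro j hj
      have hjr := List.mem_range'_1.mp hj
      have h1 : i ≤ (j : Int) := by omega
      have h2 : (j : Int) < f := by omega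
      simp only [Bool.not_eq_true', Bool.not_eq_false, Bool.and_eq_true,
        decide_eq_true_eq]
      exact ⟨by omega, by omega⟩
    have hkeep2 : (List.range' b (n - b)).filter
        (fun j : Nat => !(decide (pos ≤ (j : Int)) && decide ((j : Int) < pos + car))) = List.range' b (n - b) := by
      apply List.filter_eq_self.mpr
      intro j hj
      have hjr := List.mem_range'_1.mp hj
      have hjn : (j : Int) < (n : Int) := by exact_mod_cast (show j < n by omega)
      have hfj : f ≤ (j : Int) := by omega
      simp only [Bool.not_eq_true', Bool.and_eq_false_iff, decide_eq_false_iff_not]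
      right
      omega
    rw [hkeep1, hdrop, hkeep2, List.append_nil, List.map_append,
        map_getD_range' cs 0 a (by omega), map_getD_range' cs b (n - b) (by omega)]
    have hsl1 : PySem.List.slice cs none (some i) = cs.take a := by
      rw [← hia, PySem.List.slice_to_natCast]
    have hsl2 : PySem.List.slice cs (some f) none = cs.drop b := by
      rw [← hfb, PySem.List.slice_from_natCast]
    rw [hsl1, hsl2, List.drop_zero,
        show (cs.drop b).take (n - b) = cs.drop b from
          List.take_of_length_le (by simp only [List.length_drop]; omega)]
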